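-- pv_equiv track=rewrite | github.com/ioerger/transit2 | src/pytransit/tnseq_tools.py | runs
-- ===== SOURCE A (Python) =====
-- def runs(data):
--     """Return list of all the runs of consecutive non-insertions.
--
--     Arguments:
--         data (list): List of numeric data.
--
--     Returns:
--         list: List of the length of the runs of non-insertions. Non-zero sites are treated as runs of zero.
--     """
--     runs = []
--     current_r = 0
--     for read in data:
--         if read > 0:  # If ending a run of zeros
--             if current_r > 0:  # If we were in a run, add to list
--                 runs.append(current_r)
--             current_r = 0
--             runs.append(current_r)
--         else:
--             current_r += 1
--     # If we ended in a run, add it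
--     if current_r > 0:
--         runs.append(current_r)
--
--     if not runs:
--         return [0]
--     return runs
-- ===== SOURCE B (Python) =====
-- def runs(data):
--     """Return list of all the runs of consecutive non-insertions (group-scan version)."""
--     result = []
--     n = len(data)
--     i = 0
--     while i < n:
--         positive = data[i] > 0
--         j = i + 1
--         while j < n and (data[j] > 0) == positive:
--             j += 1
--         if positive:
--             result.extend([0] * (j - i))
--         else:
--             result.append(j - i)
--         i = j
--     return result if result else [0]
-- ===== Notes on version B (the rewrite author's own statement) =====
-- stated objective: alternative
-- what changed: Replaces A's single element-by-element accumulator loop (tracking the current run length and flushing it at each positive read) with a two-level group scan that finds each maximal block of same-sign-class elements by index span and emits its contribution at once.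
import Mathlib
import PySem

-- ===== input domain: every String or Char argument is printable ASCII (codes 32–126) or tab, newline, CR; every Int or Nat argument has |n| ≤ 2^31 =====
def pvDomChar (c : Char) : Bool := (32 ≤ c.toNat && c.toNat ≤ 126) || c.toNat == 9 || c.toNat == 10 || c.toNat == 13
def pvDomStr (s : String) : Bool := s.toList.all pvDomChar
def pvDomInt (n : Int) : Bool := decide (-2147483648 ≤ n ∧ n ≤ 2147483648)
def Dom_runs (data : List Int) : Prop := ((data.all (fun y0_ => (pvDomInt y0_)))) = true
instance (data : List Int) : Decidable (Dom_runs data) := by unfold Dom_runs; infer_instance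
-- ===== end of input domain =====

-- B replaces A's element-by-element run accumulator with a two-level maximal-group index scan; alternative decomposition, same cost.

-- ===== PORT A =====
-- A's for-loop over the data, carrying (runs, current_r)
def runsLoop : List Int → List Int × Int → List Int × Int
  | [], s => s
  | read :: rest, (acc, cur) =>
      if read > 0 then
        runsLoop rest ((if cur > 0 then acc ++ [cur] else acc) ++ [0], 0)
      else
        runsLoop rest (acc, cur + 1)

def runs (data : List Int) : List Int :=
  let s := runsLoop data ([], 0)
  let r := if s.2 > 0 then s.1 ++ [s.2] else s.1
  if r = [] then [0] else r

-- ===== PORT B =====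
-- inner while: advance j while data[j] has the same sign class as the group head
def bInner (data : List Int) (n : Nat) (positive : Bool) (j : Nat) : Nat :=
  if h : j < n ∧ decide (data.getD j 0 > 0) = positive then bInner data n positive (j + 1) else j
  termination_by n - j
  decreasing_by omega

theorem bInner_ge (data : List Int) (n : Nat) (positive : Bool) (j : Nat) :
    j ≤ bInner data n positive j := by
  fun_induction bInner data n positive j with
  | case1 j h ih => omega
  | case2 j h => omega

-- outer while over group start indices i
def bOuter (data : List Int) (n : Nat) (i : Nat) (result : List Int) : List Int :=
  if h : i < n then
    let positive := decide (data.getD i 0 > 0)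
    let j := bInner data n positive (i + 1)
    let result' := if positive then result ++ List.replicate (j - i) 0
                   else result ++ [((j - i : Nat) : Int)]
    bOuter data n j result'
  else result
  termination_by n - i
  decreasing_by
    have := bInner_ge data n (decide (data.getD i 0 > 0)) (i + 1)
    omega

def runs_alt (data : List Int) : List Int :=
  let r := bOuter data data.length 0 []
  if r = [] then [0] else r

-- ===== PRECONDITION & SPEC =====
def Spec_runs (data : List Int) (out : List Int) : Prop := out = runs_alt data
instance (data : List Int) (out : List Int) : Decidable (Spec_runs data out) := by unfold Spec_runs; infer_instance

-- ===== CLAIM (what is proved, stated in full; the proofs are below) =====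
def Claim_equal_runs : Prop := ∀ (data : List Int), Dom_runs data → Spec_runs data (runs data)

-- ===== LEMMAS AND PROOFS =====

-- the emission of one maximal group at a time, used as the common reference shape
def emitG : List Int → List Int
  | [] => []
  | x :: xs =>
      let t := xs.takeWhile (fun y => decide (y > 0) = decide (x > 0))
      let r := xs.dropWhile (fun y => decide (y > 0) = decide (x > 0))
      (if x > 0 then List.replicate (t.length + 1) (0 : Int) else [((t.length + 1 : Nat) : Int)])
        ++ emitG r
  termination_by l => l.length
  decreasing_by
    have := List.length_dropWhile_le (fun y => decide (y > 0) = decide (x > 0)) xs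
    simp at *; omega

def finishA (s : List Int × Int) : List Int := if s.2 > 0 then s.1 ++ [s.2] else s.1

theorem dropWhile_head {α : Type} (p : α → Bool) :
    ∀ (l : List α) (y : α) (ys : List α), l.dropWhile p = y :: ys → p y = false := by
  intro l
  induction l with
  | nil => intro y ys h; simp [List.dropWhile] at h
  | cons a as ih =>
      intro y ys h
      by_cases hp : p a
      · rw [List.dropWhile_cons_of_pos hp] at h; exact ih y ys h
      · rw [List.dropWhile_cons_of_neg hp] at h
        cases h; simpa using hp

theorem negRun : ∀ (t : List Int) (rest : List Int) (acc : List Int) (cur : Int),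
    (∀ y ∈ t, ¬ y > 0) →
    runsLoop (t ++ rest) (acc, cur) = runsLoop rest (acc, cur + t.length) := by
  intro t
  induction t with
  | nil => intro rest acc cur _; simp
  | cons x xs ih =>
      intro rest acc cur h
      have hx : ¬ x > 0 := h x (by simp)
      simp only [List.cons_append, runsLoop, if_neg hx]
      rw [ih rest acc (cur + 1) (fun y hy => h y (by simp [hy]))]
      congr 1
      simp; ring

theorem posRun : ∀ (t : List Int) (rest : List Int) (acc : List Int),
    (∀ y ∈ t, y > 0) →
    runsLoop (t ++ rest) (acc, 0) = runsLoop rest (acc ++ List.replicate t.length 0, 0) := by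
  intro t
  induction t with
  | nil => intro rest acc _; simp
  | cons x xs ih =>
      intro rest acc h
      have hx : x > 0 := h x (by simp)
      simp only [List.cons_append, runsLoop, if_pos hx]
      have h0 : ¬ (0 : Int) > 0 := by omega
      rw [if_neg h0, ih rest (acc ++ [0]) (fun y hy => h y (by simp [hy]))]
      congr 1
      simp [List.replicate_succ]

theorem flushLemma (rest : List Int) (acc : List Int) (cur : Int)
    (hcur : cur > 0) (hrest : ∀ y ys, rest = y :: ys → y > 0) :
    finishA (runsLoop rest (acc, cur)) = finishA (runsLoop rest (acc ++ [cur], 0)) := by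
  cases rest with
  | nil => simp [runsLoop, finishA, if_pos hcur]
  | cons y ys =>
      have hy : y > 0 := hrest y ys rfl
      have h0 : ¬ (0 : Int) > 0 := by omega
      simp only [runsLoop, if_pos hy, if_pos hcur, if_neg h0]

theorem loopA_emitG : ∀ (l : List Int) (acc : List Int),
    finishA (runsLoop l (acc, 0)) = acc ++ emitG l := by
  intro l
  fun_induction emitG l with
  | case1 => intro acc; simp [runsLoop, finishA]
  | case2 x xs t r ih =>
      intro acc
      have hsplit : xs = t ++ r := (List.takeWhile_append_dropWhile).symm
      by_cases hx : x > 0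
      · have ht : ∀ y ∈ t, y > 0 := by
          intro y hy
          have := List.mem_takeWhile_imp hy
          simp [hx] at this; exact this
        have h0 : ¬ (0 : Int) > 0 := by omega
        conv_lhs => rw [hsplit]
        simp only [runsLoop, if_pos hx, if_neg h0]
        rw [posRun t r (acc ++ [0]) ht, ih]
        simp [List.replicate_succ]
      · have ht : ∀ y ∈ t, ¬ y > 0 := by
          intro y hy
          have := List.mem_takeWhile_imp hy
          simp [hx] at this; omega
        conv_lhs => rw [hsplit]
        simp only [runsLoop, if_neg hx]
        rw [negRun t r acc (0 + 1) ht]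
        have hcur : (0 : Int) + 1 + t.length > 0 := by positivity
        have hrest : ∀ y ys, r = y :: ys → y > 0 := by
          intro y ys hr
          have := dropWhile_head _ xs y ys hr
          simp [hx] at this; exact this
        rw [flushLemma r acc _ hcur hrest, ih]
        have hc : (0 : Int) + 1 + (t.length : Int) = ((t.length + 1 : Nat) : Int) := by
          push_cast; ring
        rw [hc]
        simp

theorem bInner_char (data : List Int) (p : Bool) : ∀ (j : Nat),
    bInner data data.length p j =
      j + ((data.drop j).takeWhile (fun y => decide (y > 0) = p)).length := by
  intro j
  fun_induction bInner data data.length p j with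
  | case1 j h ih =>
      obtain ⟨hj, hp⟩ := h
      rw [ih]
      rw [List.drop_eq_getElem_cons hj]
      have : data.getD j 0 = data[j] := List.getD_eq_getElem data 0 hj
      rw [this] at hp
      rw [List.takeWhile_cons_of_pos (by simpa using hp)]
      simp; omega
  | case2 j h =>
      by_cases hj : j < data.length
      · have hp : ¬ decide (data.getD j 0 > 0) = p := fun hc => h ⟨hj, hc⟩
        rw [List.drop_eq_getElem_cons hj]
        have hg : data.getD j 0 = data[j] := List.getD_eq_getElem data 0 hj
        rw [List.takeWhile_cons_of_neg (by rw [← hg]; simpa using hp)]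
        simp
      · rw [List.drop_eq_nil_of_le (by omega)]
        simp

theorem dropWhile_eq_drop {α : Type} (p : α → Bool) :
    ∀ (l : List α), l.dropWhile p = l.drop (l.takeWhile p).length := by
  intro l
  induction l with
  | nil => simp
  | cons a as ih =>
      by_cases hp : p a
      · rw [List.dropWhile_cons_of_pos hp, List.takeWhile_cons_of_pos hp]
        simpa using ih
      · rw [List.dropWhile_cons_of_neg hp, List.takeWhile_cons_of_neg hp]
        simp

theorem bOuter_emitG (data : List Int) (i : Nat) (result : List Int) :
    bOuter data data.length i result = result ++ emitG (data.drop i) := by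
  fun_induction bOuter data data.length i result with
  | case2 i result h =>
      rw [List.drop_eq_nil_of_le (by omega)]
      simp [emitG]
  | case1 i result h positive j result2 ih =>
      rw [ih]
      have hg : data.getD i 0 = data[i] := List.getD_eq_getElem data 0 h
      set p := decide (data.getD i 0 > 0) with hp
      set t := (data.drop (i + 1)).takeWhile (fun y => decide (y > 0) = p) with htdef
      have hj : bInner data data.length p (i + 1) = (i + 1) + t.length :=
        bInner_char data p (i + 1)
      have hdw : (data.drop (i + 1)).dropWhile (fun y => decide (y > 0) = p)
          = data.drop ((i + 1) + t.length) := by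
        rw [dropWhile_eq_drop, List.drop_drop, ← htdef, Nat.add_comm]
      rw [List.drop_eq_getElem_cons h]
      rw [emitG]
      simp only [← hg, ← hp, ← htdef, hdw]
      have hlen : i + 1 + t.length - i = t.length + 1 := by omega
      simp only [result2, j, positive]
      rw [← hp, hj, hlen]
      by_cases hpos : data.getD i 0 > 0
      · have hpt : p = true := by rw [hp]; exact decide_eq_true hpos
        rw [dif_pos hpt, if_pos hpos]
        simp [List.append_assoc]
      · have hpf : ¬ p = true := by rw [hp]; simp only [decide_eq_true_eq]; exact hpos
        rw [dif_neg hpf, if_neg hpos]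
        simp [List.append_assoc]

theorem runs_eq (data : List Int) : runs data = runs_alt data := by
  unfold runs runs_alt
  have hA : (let s := runsLoop data ([], 0);
             if s.2 > 0 then s.1 ++ [s.2] else s.1) = emitG data := by
    have := loopA_emitG data []
    simpa [finishA] using this
  have hB : bOuter data data.length 0 [] = emitG data := by
    simpa using bOuter_emitG data 0 []
  simp only [hA, hB]

-- ===== VERDICT (by name: the statement is the Claim_ definition above) =====
theorem runs_spec : Claim_equal_runs := by
  intro data _
  unfold Spec_runs
  exact runs_eq data
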